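-- pv_equiv track=rewrite | github.com/TianHongTao/CCKS_2019_-D | att_lstm_fal.py | get_en_pos
-- ===== SOURCE A (Python) =====
-- def get_en_pos(words, en1, en2):
--     # en_pos = (words.index(en1), list(reversed(words)).index(en2))
--     en1_pos, en2_pos = None, None
--     for i in range(len(words)):
--         if en1 is not None and words[i] == en1:
--             en1_pos = i
--         if words[i] == en2:
--             en2_pos = i
--     if en1 is None:
--         en1_pos = 0
--     if en2 is None:
--         en2_pos = len(words) - 1
--     return en1_pos, en2_pos
-- ===== SOURCE B (Python) =====
-- def _last_index(words, v):
--     # scan from the end; the first hit from the back is the last occurrence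
--     for j, w in enumerate(reversed(words)):
--         if w == v:
--             return len(words) - 1 - j
--     return None
--
-- def get_en_pos(words, en1, en2):
--     en1_pos = 0 if en1 is None else _last_index(words, en1)
--     en2_pos = len(words) - 1 if en2 is None else _last_index(words, en2)
--     return en1_pos, en2_pos
-- ===== Notes on version B (the rewrite author's own statement) =====
-- stated objective: alternative
-- what changed: A's single forward sweep maintaining both positions is replaced by two independent reverse searches that return at the first (i.e. last-occurrence) match.
import Mathlib
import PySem

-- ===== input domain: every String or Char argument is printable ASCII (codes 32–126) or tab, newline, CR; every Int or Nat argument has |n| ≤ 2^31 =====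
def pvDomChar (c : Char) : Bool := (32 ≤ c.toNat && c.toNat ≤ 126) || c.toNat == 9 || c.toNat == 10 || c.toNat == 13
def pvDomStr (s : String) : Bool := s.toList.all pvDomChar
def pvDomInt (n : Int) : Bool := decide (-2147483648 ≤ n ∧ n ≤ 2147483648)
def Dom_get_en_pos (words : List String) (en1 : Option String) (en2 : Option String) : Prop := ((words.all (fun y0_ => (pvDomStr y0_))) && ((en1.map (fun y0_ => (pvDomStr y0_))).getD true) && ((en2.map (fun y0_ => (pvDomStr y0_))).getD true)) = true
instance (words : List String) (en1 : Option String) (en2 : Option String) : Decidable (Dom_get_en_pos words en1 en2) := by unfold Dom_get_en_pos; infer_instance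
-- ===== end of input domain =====

-- B replaces A's single forward sweep (tracking both positions) by two independent
-- reverse searches that stop at the first match from the back (alternative decomposition).

-- ===== PORT A =====
-- one forward pass over enumerate(words), overwriting each slot at every match
def get_en_pos (words : List String) (en1 : Option String) (en2 : Option String) : Option Int × Option Int :=
  let st := (PySem.List.enumerate words 0).foldl
    (fun (s : Option Int × Option Int) p =>
      ((if en1 ≠ none ∧ some p.2 = en1 then some p.1 else s.1),
       (if some p.2 = en2 then some p.1 else s.2)))
    (none, none)
  ((if en1 = none then some 0 else st.1),
   (if en2 = none then some ((words.length : Int) - 1) else st.2))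

-- ===== PORT B =====
-- helper _last_index: first match scanning reversed(words), index translated back
def lastIndex (words : List String) (v : String) : Option Int :=
  (words.reverse.findIdx? (fun w => w == v)).map
    (fun j => (words.length : Int) - 1 - (j : Int))

def get_en_pos_alt (words : List String) (en1 : Option String) (en2 : Option String) : Option Int × Option Int :=
  ((match en1 with | none => some 0 | some e => lastIndex words e),
   (match en2 with | none => some ((words.length : Int) - 1) | some e => lastIndex words e))

-- ===== PRECONDITION & SPEC =====
def Spec_get_en_pos (words : List String) (en1 : Option String) (en2 : Option String) (out : Option Int × Option Int) : Prop := out = get_en_pos_alt words en1 en2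
instance (words : List String) (en1 : Option String) (en2 : Option String) (out : Option Int × Option Int) : Decidable (Spec_get_en_pos words en1 en2 out) := by unfold Spec_get_en_pos; infer_instance

-- ===== CLAIM (what is proved, stated in full; the proofs are below) =====
def Claim_equal_get_en_pos : Prop := ∀ (words : List String) (en1 : Option String) (en2 : Option String), Dom_get_en_pos words en1 en2 → Spec_get_en_pos words en1 en2 (get_en_pos words en1 en2)

-- ===== LEMMAS AND PROOFS =====

theorem lastIndex_append (ws : List String) (a v : String) :
    lastIndex (ws ++ [a]) v =
      if a = v then some ((ws.length : Int)) else lastIndex ws v := by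
  unfold lastIndex
  simp only [List.reverse_append, List.reverse_singleton, List.singleton_append,
    List.findIdx?_cons, List.length_append, List.length_singleton]
  by_cases h : a = v
  · simp [h]
  · have hb : (a == v) = false := by simp [h]
    rw [hb]
    cases hfi : ws.reverse.findIdx? (fun w => w == v) with
    | none => simp [h]
    | some j =>
      simp only [h, if_false, Bool.false_eq_true, Option.map_some, Option.pure_def,
        Option.bind_eq_bind, Option.bind_some, Option.some.injEq]
      push_cast
      ring

theorem fold_eq_lastIndex (ws : List String) (en1 en2 : Option String) :
    (PySem.List.enumerate ws 0).foldl
      (fun (s : Option Int × Option Int) p =>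
        ((if en1 ≠ none ∧ some p.2 = en1 then some p.1 else s.1),
         (if some p.2 = en2 then some p.1 else s.2)))
      (none, none)
    = (en1.bind (lastIndex ws), en2.bind (lastIndex ws)) := by
  induction ws using List.reverseRecOn with
  | nil => cases en1 <;> cases en2 <;> simp [lastIndex]
  | append_singleton ws a ih =>
    rw [PySem.List.enumerate_append, List.foldl_append, ih]
    simp only [PySem.List.enumerate_cons, PySem.List.enumerate_nil, List.foldl_cons,
      List.foldl_nil]
    cases en1 with
    | none =>
      cases en2 with
      | none => simp
      | some e2 =>
        simp only [Option.bind_some, Option.bind_none, lastIndex_append]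
        by_cases h2 : a = e2 <;> simp [h2]
    | some e1 =>
      cases en2 with
      | none =>
        simp only [Option.bind_some, Option.bind_none, lastIndex_append]
        by_cases h1 : a = e1 <;> simp [h1]
      | some e2 =>
        simp only [Option.bind_some, lastIndex_append]
        by_cases h1 : a = e1 <;> by_cases h2 : a = e2 <;> simp [h1, h2]

-- ===== VERDICT (by name: the statement is the Claim_ definition above) =====
theorem get_en_pos_spec : Claim_equal_get_en_pos := by
  intro words en1 en2 _
  unfold Spec_get_en_pos get_en_pos get_en_pos_alt
  rw [fold_eq_lastIndex]
  cases en1 <;> cases en2 <;> simp
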